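-- pv_equiv track=rewrite | github.com/simonegiacomelli/personal-bin | irplib.py | mark_last
-- ===== SOURCE A (Python) =====
-- def mark_last(iterable) -> (any, bool):
--     """
--     A generator function that takes an iterable and yields (item, is_last)
--     where is_last is True only for the last item of the iterable.
--     """
--     it = iter(iterable)
--     try:
--         prev = next(it)  # Start by reading the first element
--     except StopIteration:
--         return
--
--     for item in it:
--         yield prev, False  # 'prev' is not the last because we have more items ahead
--         prev = item
--
--     yield prev, True
-- ===== SOURCE B (Python) =====
-- def mark_last(iterable) -> (any, bool):
--     """Yield (item, is_last) by materializing the iterable and comparing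
--     each index with the last index."""
--     items = list(iterable)
--     for i, item in enumerate(items):
--         yield item, i == len(items) - 1
-- ===== Notes on version B (the rewrite author's own statement) =====
-- stated objective: simpler
-- what changed: Replaces the one-element lookahead buffer with a materialized list plus enumerate, marking the last item by an index-vs-length test.
import Mathlib
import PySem

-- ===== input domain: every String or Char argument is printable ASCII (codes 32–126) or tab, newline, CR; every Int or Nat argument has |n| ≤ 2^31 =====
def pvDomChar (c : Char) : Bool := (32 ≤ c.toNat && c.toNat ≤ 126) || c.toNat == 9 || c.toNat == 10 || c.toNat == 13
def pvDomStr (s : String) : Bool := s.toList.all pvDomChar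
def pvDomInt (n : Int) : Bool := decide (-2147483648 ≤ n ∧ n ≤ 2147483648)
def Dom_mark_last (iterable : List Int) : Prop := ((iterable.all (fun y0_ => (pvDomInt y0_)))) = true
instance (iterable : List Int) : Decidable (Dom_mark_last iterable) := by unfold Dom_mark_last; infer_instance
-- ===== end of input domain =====

-- B replaces A's one-element lookahead buffer by a materialized list with an
-- index-vs-length last-element test (objective: simpler).

-- ===== PORT A =====
-- the 'for item in it' loop carrying the lookahead buffer 'prev'
def markLastLoop (prev : Int) : List Int → List (Int × Bool)
  | [] => [(prev, true)]
  | item :: rest => (prev, false) :: markLastLoop item rest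

def mark_last (iterable : List Int) : List (Int × Bool) :=
  match iterable with
  | [] => []                      -- next(it) raised StopIteration: generator returns nothing
  | first :: rest => markLastLoop first rest

-- ===== PORT B =====
def mark_last_alt (iterable : List Int) : List (Int × Bool) :=
  (PySem.List.enumerate iterable 0).map
    (fun p => (p.2, p.1 == (iterable.length : Int) - 1))

-- ===== PRECONDITION & SPEC =====
def Spec_mark_last (iterable : List Int) (out : List (Int × Bool)) : Prop := out = mark_last_alt iterable
instance (iterable : List Int) (out : List (Int × Bool)) : Decidable (Spec_mark_last iterable out) := by unfold Spec_mark_last; infer_instance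

-- ===== CLAIM (what is proved, stated in full; the proofs are below) =====
def Claim_equal_mark_last : Prop := ∀ (iterable : List Int), Dom_mark_last iterable → Spec_mark_last iterable (mark_last iterable)

-- ===== LEMMAS AND PROOFS =====
theorem markLastLoop_eq_enumerate (xs : List Int) : ∀ (prev : Int) (s : Int),
    markLastLoop prev xs
      = (PySem.List.enumerate (prev :: xs) s).map
          (fun p => (p.2, p.1 == s + (xs.length : Int))) := by
  induction xs with
  | nil =>
    intro prev s
    simp [markLastLoop, PySem.List.enumerate_cons, PySem.List.enumerate_nil]
  | cons x xs ih =>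
    intro prev s
    have h1 : markLastLoop x xs
        = (PySem.List.enumerate (x :: xs) (s + 1)).map
            (fun p => (p.2, p.1 == (s + 1) + (xs.length : Int))) := ih x (s + 1)
    simp [markLastLoop, PySem.List.enumerate_cons, h1]
    constructor
    · omega
    · intro a b _
      constructor <;> (intro h; omega)

-- ===== VERDICT (by name: the statement is the Claim_ definition above) =====
theorem mark_last_spec : Claim_equal_mark_last := by
  intro iterable _
  cases iterable with
  | nil => simp [Spec_mark_last, mark_last, mark_last_alt, PySem.List.enumerate_nil]
  | cons first rest =>
    simp only [Spec_mark_last, mark_last, mark_last_alt]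
    rw [markLastLoop_eq_enumerate rest first 0]
    apply List.map_congr_left
    intro p _
    have : (0 : Int) + (rest.length : Int) = ((first :: rest).length : Int) - 1 := by
      simp
    rw [this]
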